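-- pv_equiv track=rewrite | github.com/marcus-elia/toom-cook-python | thresholds.py | list_to_intervals
-- ===== SOURCE A (Python) =====
-- def list_to_intervals(L):
--     """ This converts an increasing list of distinct positive integers into
--         a string that uses a dash for a run of consecutives.
--         For example, [1,2,3,5,7,8] becomes "1-3, 5, 7-8" """
--     if len(L) == 0:
--         return ""
--     if len(L) == 1:
--         return str(L[0])
--
--     s = str(L[0])
--     prev_int = L[0]
--     cur_run_len = 0
--     for i in L[1:]:
--         if cur_run_len == 0 and i == prev_int + 1:
--             s += '-'
--             prev_int = i
--             cur_run_len = 1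
--         elif cur_run_len > 0 and i == prev_int + 1:
--             prev_int = i
--             cur_run_len += 1
--         elif cur_run_len > 0 and i != prev_int + 1:
--             s += str(prev_int)
--             s += ", "
--             s += str(i)
--             prev_int = i
--             cur_run_len = 0
--         elif cur_run_len == 0 and i != prev_int + 1:
--             s += ", "
--             s += str(i)
--             prev_int = i
--     if s[-1] == '-':     # a cheap fix
--         s += str(L[-1])
--     return s
-- ===== SOURCE B (Python) =====
-- def list_to_intervals(L):
--     """ Same result as A: group into runs of consecutive integers first,
--         then format each run and join. """
--     if not L:
--         return ""
--     runs = []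
--     start = prev = L[0]
--     for x in L[1:]:
--         if x == prev + 1:
--             prev = x
--         else:
--             runs.append((start, prev))
--             start = prev = x
--     runs.append((start, prev))
--     return ", ".join(str(a) if a == b else "%d-%d" % (a, b) for a, b in runs)
-- ===== Notes on version B (the rewrite author's own statement) =====
-- stated objective: simpler
-- what changed: B builds a list of (start,end) runs in one scan and then formats/joins them, replacing A's four-branch string-concatenating state machine and its trailing-dash patch-up.
import Mathlib
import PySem

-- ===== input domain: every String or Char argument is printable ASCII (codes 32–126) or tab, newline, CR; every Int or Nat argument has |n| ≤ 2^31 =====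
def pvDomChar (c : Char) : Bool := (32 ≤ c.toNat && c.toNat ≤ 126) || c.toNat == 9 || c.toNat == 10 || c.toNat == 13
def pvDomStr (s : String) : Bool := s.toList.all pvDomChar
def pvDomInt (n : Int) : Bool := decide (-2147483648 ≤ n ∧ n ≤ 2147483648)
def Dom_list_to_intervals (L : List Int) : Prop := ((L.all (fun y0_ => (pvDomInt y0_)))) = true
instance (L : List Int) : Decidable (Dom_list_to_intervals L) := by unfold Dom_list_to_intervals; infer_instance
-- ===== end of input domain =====

-- B replaces A's four-branch string-building state machine (and its trailing-dash patch)
-- by a run-list pass followed by format-and-join: simpler decomposition, same values.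


-- ===== PORT A =====
-- Strings are handled on the List Char side (PySem convention); the final String.ofList wraps up.
-- One loop step of A: state (s, prev_int, cur_run_len), branches in A's order.
def stepA (st : List Char × Int × Int) (i : Int) : List Char × Int × Int :=
  if st.2.2 = 0 ∧ i = st.2.1 + 1 then (st.1 ++ ['-'], i, 1)
  else if st.2.2 > 0 ∧ i = st.2.1 + 1 then (st.1, i, st.2.2 + 1)
  else if st.2.2 > 0 ∧ i ≠ st.2.1 + 1 then
    (st.1 ++ PySem.Int.toChars st.2.1 ++ ", ".toList ++ PySem.Int.toChars i, i, 0)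
  else if st.2.2 = 0 ∧ i ≠ st.2.1 + 1 then
    (st.1 ++ ", ".toList ++ PySem.Int.toChars i, i, st.2.2)
  else st

def list_to_intervals (L : List Int) : String :=
  if PySem.List.len L = 0 then ""
  else if PySem.List.len L = 1 then PySem.Int.toStr (PySem.List.pyGetD L 0 0)
  else
    let st := (PySem.List.slice L (some 1) none).foldl stepA
      (PySem.Int.toChars (PySem.List.pyGetD L 0 0), PySem.List.pyGetD L 0 0, 0)
    String.ofList (if PySem.List.pyGet? st.1 (-1) = some '-' then
                 st.1 ++ PySem.Int.toChars (PySem.List.pyGetD L (-1) 0)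
               else st.1)

-- ===== PORT B =====
-- One loop step of B: state (runs, start, prev); extend the run or close it and open a new one.
def stepB (st : List (Int × Int) × Int × Int) (i : Int) : List (Int × Int) × Int × Int :=
  if i = st.2.2 + 1 then (st.1, st.2.1, i) else (st.1 ++ [(st.2.1, st.2.2)], i, i)

-- str(a) if a == b else "a-b"
def pieceB (r : Int × Int) : List Char :=
  if r.1 = r.2 then PySem.Int.toChars r.1
  else PySem.Int.toChars r.1 ++ '-' :: PySem.Int.toChars r.2

def list_to_intervals_alt (L : List Int) : String :=
  match L with
  | [] => ""
  | x :: rest =>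
    let st := rest.foldl stepB ([], x, x)
    String.ofList (PySem.Chars.join ", ".toList ((st.1 ++ [(st.2.1, st.2.2)]).map pieceB))

-- ===== PRECONDITION & SPEC =====
def Spec_list_to_intervals (L : List Int) (out : String) : Prop := out = list_to_intervals_alt L
instance (L : List Int) (out : String) : Decidable (Spec_list_to_intervals L out) := by unfold Spec_list_to_intervals; infer_instance

-- ===== CLAIM (what is proved, stated in full; the proofs are below) =====
def Claim_equal_list_to_intervals : Prop := ∀ (L : List Int), Dom_list_to_intervals L → Spec_list_to_intervals L (list_to_intervals L)

-- ===== LEMMAS AND PROOFS =====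

-- str(n) never ends in '-' and is never empty (its digits are Nat.digitChar of values < 10).
theorem pv_toDigitsCore_ne_nil_of_ds : ∀ (fuel n : Nat) (ds : List Char), ds ≠ [] →
    Nat.toDigitsCore 10 fuel n ds ≠ [] := by
  intro fuel
  induction fuel with
  | zero => intro n ds h; simpa [Nat.toDigitsCore] using h
  | succ f ih =>
    intro n ds h
    simp only [Nat.toDigitsCore]
    split
    · simp
    · exact ih _ _ (by simp)

theorem pv_toDigits_ne_nil (fuel n : Nat) (ds : List Char) (hf : fuel ≠ 0) :
    Nat.toDigitsCore 10 fuel n ds ≠ [] := by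
  cases fuel with
  | zero => exact absurd rfl hf
  | succ f =>
    simp only [Nat.toDigitsCore]
    split
    · simp
    · exact pv_toDigitsCore_ne_nil_of_ds _ _ _ (by simp)

theorem pv_mem_toDigitsCore : ∀ (fuel n : Nat) (ds : List Char) (c : Char),
    c ∈ Nat.toDigitsCore 10 fuel n ds → c ∈ ds ∨ ∃ k, k < 10 ∧ c = Nat.digitChar k := by
  intro fuel
  induction fuel with
  | zero => intro n ds c h; left; simpa [Nat.toDigitsCore] using h
  | succ f ih =>
    intro n ds c h
    simp only [Nat.toDigitsCore] at h
    split at h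
    · rcases List.mem_cons.1 h with h | h
      · right; exact ⟨n % 10, Nat.mod_lt _ (by norm_num), h⟩
      · left; exact h
    · rcases ih _ _ _ h with h | h
      · rcases List.mem_cons.1 h with h | h
        · right; exact ⟨n % 10, Nat.mod_lt _ (by norm_num), h⟩
        · left; exact h
      · right; exact h

theorem pv_digitChar_ne_dash (k : Nat) (hk : k < 10) : Nat.digitChar k ≠ '-' := by
  interval_cases k <;> decide

theorem pv_toChars_getLast_ne_dash (n : Int) (c : Char)
    (h : (PySem.Int.toChars n).getLast? = some c) : c ≠ '-' := by
  have hd : ∀ (m : Nat) (c : Char), (Nat.toDigits 10 m).getLast? = some c → c ≠ '-' := by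
    intro m c h
    have hm : c ∈ Nat.toDigits 10 m := List.mem_of_getLast? h
    rcases pv_mem_toDigitsCore _ _ _ _ hm with h' | ⟨k, hk, rfl⟩
    · simp at h'
    · exact pv_digitChar_ne_dash k hk
  have hne : Nat.toDigits 10 n.natAbs ≠ [] := pv_toDigits_ne_nil (n.natAbs + 1) n.natAbs [] (by simp)
  unfold PySem.Int.toChars at h
  split at h
  · rw [show ('-' :: Nat.toDigits 10 n.natAbs) = ['-'] ++ Nat.toDigits 10 n.natAbs from rfl,
      List.getLast?_append] at h
    cases hg : (Nat.toDigits 10 n.natAbs).getLast? with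
    | none => exact absurd (List.getLast?_eq_none_iff.1 hg) hne
    | some d => rw [hg] at h; simp at h; subst h; exact hd _ _ hg
  · exact hd _ _ h

theorem pv_toChars_ne_nil (n : Int) : PySem.Int.toChars n ≠ [] := by
  unfold PySem.Int.toChars
  split
  · simp
  · exact pv_toDigits_ne_nil _ _ _ (by simp)

-- the '-' test on a string ending in str(n) is false
theorem pv_last_after_toChars (xs : List Char) (n : Int) :
    PySem.List.pyGet? (xs ++ PySem.Int.toChars n) (-1) ≠ some '-' := by
  rw [PySem.List.pyGet?_neg_one, List.getLast?_append]
  cases hg : (PySem.Int.toChars n).getLast? with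
  | none => exact absurd (List.getLast?_eq_none_iff.1 hg) (pv_toChars_ne_nil n)
  | some c =>
    simp only [Option.some_or]
    intro h
    exact pv_toChars_getLast_ne_dash n c hg (by injection h)

-- joined runs with a trailing separator after each piece
def pvSepd (rs : List (Int × Int)) : List Char :=
  (rs.map (fun r => pieceB r ++ ", ".toList)).flatten

theorem pv_join_append_single (rs : List (Int × Int)) (r : Int × Int) :
    PySem.Chars.join ", ".toList ((rs ++ [r]).map pieceB) = pvSepd rs ++ pieceB r := by
  induction rs with
  | nil => simp [pvSepd, PySem.Chars.join_singleton]
  | cons a rs ih =>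
    have : ((a :: rs ++ [r]).map pieceB) = pieceB a :: ((rs ++ [r]).map pieceB) := by simp
    rw [this]
    cases hrs : (rs ++ [r]).map pieceB with
    | nil => simp at hrs
    | cons q qs =>
      rw [PySem.Chars.join_cons_cons, ← hrs, ih]
      simp [pvSepd, List.append_assoc]

theorem pv_sepd_append (rs : List (Int × Int)) (r : Int × Int) :
    pvSepd (rs ++ [r]) = pvSepd rs ++ pieceB r ++ ", ".toList := by
  simp [pvSepd, List.append_assoc]

-- the loop invariant: A's string state vs B's run-list state, and the final fix-up
theorem pv_loop (rest : List Int) :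
    ∀ (runs : List (Int × Int)) (start prev : Int) (s : List Char) (run : Int),
    ((run = 0 ∧ start = prev ∧ s = pvSepd runs ++ PySem.Int.toChars prev) ∨
     (0 < run ∧ start < prev ∧ s = pvSepd runs ++ PySem.Int.toChars start ++ ['-'])) →
    (let a := rest.foldl stepA (s, prev, run)
     let b := rest.foldl stepB (runs, start, prev)
     a.2.1 = (prev :: rest).getLast (by simp) ∧
     (if PySem.List.pyGet? a.1 (-1) = some '-' then a.1 ++ PySem.Int.toChars a.2.1 else a.1)
       = PySem.Chars.join ", ".toList ((b.1 ++ [(b.2.1, b.2.2)]).map pieceB)) := by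
  induction rest with
  | nil =>
    intro runs start prev s run hinv
    simp only [List.foldl_nil]
    rcases hinv with ⟨hrun, hsp, hs⟩ | ⟨hrun, hsp, hs⟩
    · refine ⟨by simp, ?_⟩
      subst hs
      rw [if_neg (pv_last_after_toChars _ _), pv_join_append_single]
      subst hsp
      simp [pieceB]
    · refine ⟨by simp, ?_⟩
      subst hs
      rw [show pvSepd runs ++ PySem.Int.toChars start ++ ['-']
            = (pvSepd runs ++ PySem.Int.toChars start) ++ ['-'] by simp [List.append_assoc],
        if_pos (PySem.List.pyGet?_neg_one_append_singleton _ _), pv_join_append_single]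
      have : start ≠ prev := ne_of_lt hsp
      simp [pieceB, this, List.append_assoc]
  | cons i rest ih =>
    intro runs start prev s run hinv
    simp only [List.foldl_cons]
    rcases hinv with ⟨hrun, hsp, hs⟩ | ⟨hrun, hsp, hs⟩
    · by_cases hi : i = prev + 1
      · have hA : stepA (s, prev, run) i = (s ++ ['-'], i, 1) := by
          simp [stepA, hrun, hi]
        have hB : stepB (runs, start, prev) i = (runs, start, i) := by
          simp [stepB, hi]
        rw [hA, hB]
        have := ih runs start i (s ++ ['-']) 1
          (Or.inr ⟨by norm_num, by omega, by simp [hs, hsp, List.append_assoc]⟩)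
        simpa using this
      · have hA : stepA (s, prev, run) i
            = (s ++ ", ".toList ++ PySem.Int.toChars i, i, run) := by
          simp [stepA, hrun, hi]
        have hB : stepB (runs, start, prev) i = (runs ++ [(start, prev)], i, i) := by
          simp [stepB, hi]
        rw [hA, hB]
        have := ih (runs ++ [(start, prev)]) i i
          (s ++ ", ".toList ++ PySem.Int.toChars i) run
          (Or.inl ⟨hrun, rfl, by
            rw [hs, pv_sepd_append]
            subst hsp
            simp [pieceB, List.append_assoc]⟩)
        simpa using this
    · by_cases hi : i = prev + 1
      · have hA : stepA (s, prev, run) i = (s, i, run + 1) := by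
          have h0 : ¬ run = 0 := by omega
          simp [stepA, h0, hrun, hi]
        have hB : stepB (runs, start, prev) i = (runs, start, i) := by
          simp [stepB, hi]
        rw [hA, hB]
        have := ih runs start i s (run + 1)
          (Or.inr ⟨by omega, by omega, hs⟩)
        simpa using this
      · have hA : stepA (s, prev, run) i
            = (s ++ PySem.Int.toChars prev ++ ", ".toList ++ PySem.Int.toChars i, i, 0) := by
          have h0 : ¬ run = 0 := by omega
          simp [stepA, h0, hrun, hi]
        have hB : stepB (runs, start, prev) i = (runs ++ [(start, prev)], i, i) := by
          simp [stepB, hi]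
        rw [hA, hB]
        have hne : start ≠ prev := ne_of_lt hsp
        have := ih (runs ++ [(start, prev)]) i i
          (s ++ PySem.Int.toChars prev ++ ", ".toList ++ PySem.Int.toChars i) 0
          (Or.inl ⟨rfl, rfl, by
            rw [hs, pv_sepd_append]
            simp [pieceB, hne, List.append_assoc]⟩)
        simpa using this

-- ===== VERDICT (by name: the statement is the Claim_ definition above) =====
theorem list_to_intervals_spec : Claim_equal_list_to_intervals := by
  intro L _
  unfold Spec_list_to_intervals
  match L with
  | [] => rfl
  | [x] =>
    show list_to_intervals [x] = list_to_intervals_alt [x]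
    unfold list_to_intervals list_to_intervals_alt
    rw [if_neg (by simp [PySem.List.len_eq]), if_pos (by simp [PySem.List.len_eq])]
    simp only [List.foldl_nil]
    rw [PySem.List.pyGetD_zero_cons, pv_join_append_single]
    simp only [pvSepd, List.map_nil, List.flatten_nil, List.nil_append, pieceB, if_true,
      ← PySem.Int.toList_toStr, String.ofList_toList]
  | x :: y :: rest =>
    show list_to_intervals (x :: y :: rest) = list_to_intervals_alt (x :: y :: rest)
    have hslice : PySem.List.slice (x :: y :: rest) (some 1) none = y :: rest := by
      rw [PySem.List.slice_from _ (by norm_num)]; rfl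
    obtain ⟨h1, h2⟩ := pv_loop (y :: rest) [] x x (PySem.Int.toChars x) 0
      (Or.inl ⟨rfl, rfl, by simp [pvSepd]⟩)
    have hlast : PySem.List.pyGetD (x :: y :: rest) (-1) 0
        = (List.foldl stepA (PySem.Int.toChars x, x, 0) (y :: rest)).2.1 := by
      rw [PySem.List.pyGetD_neg_one _ _ (by simp), h1]
    unfold list_to_intervals list_to_intervals_alt
    rw [if_neg (by simp [PySem.List.len_eq]; omega), if_neg (by simp [PySem.List.len_eq]; omega), hslice]
    simp only [PySem.List.pyGetD_zero_cons]
    rw [hlast]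
    exact congrArg String.ofList h2
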